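-- pv_equiv track=rewrite | github.com/George-Peregoy/BurgerBot3-QR | src/path_planning/path_planning/path_pruning_c.py | _build_qr_for_indices
-- ===== SOURCE A (Python) =====
-- def _build_qr_for_indices(path, f1_idx, f2_idx, s_value, char_limit=25):
--     """
--     Build the QR payload per spec and return (qr_data_list, qr_len, path_out).
--
--     Parameters
--     ----------
--     path : list
--         List of points from RRT#.
--     f1_idx : int
--         Index of first ellipse focal point.
--     f2_idx : int
--         Index of second ellipse focal point.
--     s_value : int
--         Distance between ellipse foci.
--     char_limit : int
--         Character limit of QR-code.
--
--     Encoding rules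
--     --------------
--       - For nodes BEFORE f1: (x, y, 0)
--       - At f1: (x, y, s_value)
--       - Immediately AFTER f1: f2 as (x, y) pair unless f2 == goal (then omit)
--       - For nodes AFTER f2 (excluding goal): (x, y, 0)
--       - Goal is NEVER encoded and appended back on decode.
--       - The string may end with (x,y) or (x,y,s), but never a single x.
--
--     Returns
--     -------
--     qr : list
--         List of points in qr code. Example [x y s].
--     qr_len : int
--         Length of Qr str
--     output_path : list
--         Pruned path with ellipse.
--     """
--     path_wo_goal = path[:-1]
--     N = len(path_wo_goal)
--     # Clamp & order
--     f1_idx = max(0, min(f1_idx, N - 1))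
--     f2_idx = max(0, min(f2_idx, N - 1))
--     if f1_idx > f2_idx:
--         f1_idx, f2_idx = f2_idx, f1_idx
--
--     def would_fit(cur, add):
--         return len(' '.join(map(str, cur + add))) <= char_limit
--
--     qr = []
--
--     # 1) pre-f1 triples
--     for i in range(0, f1_idx):
--         triple = [path_wo_goal[i][0], path_wo_goal[i][1], 0]
--         if not would_fit(qr, triple):
--             return None, char_limit + 1, None
--         qr.extend(triple)
--
--     # 2) f1 triple
--     f1 = path_wo_goal[f1_idx]
--     triple_f1 = [f1[0], f1[1], int(round(s_value))]
--     if not would_fit(qr, triple_f1):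
--         return None, char_limit + 1, None
--     qr.extend(triple_f1)
--
--     # 3) f2 pair unless f2 == goal
--     goal = path[-1]
--     f2 = path_wo_goal[f2_idx]
--     if f2 != goal:
--         pair_f2 = [f2[0], f2[1]]
--         if not would_fit(qr, pair_f2):
--             return None, char_limit + 1, None
--         qr.extend(pair_f2)
--
--     # 4) post-f2 triples
--     for i in range(f2_idx + 1, N):
--         triple = [path_wo_goal[i][0], path_wo_goal[i][1], 0]
--         if not would_fit(qr, triple):
--             return None, char_limit + 1, None
--         qr.extend(triple)
--
--     # Output path that is “represented”: [.. up to f1] + [f2 .. end] + goal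
--     path_out = path_wo_goal[:f1_idx + 1] + path_wo_goal[f2_idx:] + [path[-1]]
--
--     return qr, len(' '.join(map(str, qr))), path_out
-- ===== SOURCE B (Python) =====
-- def _build_qr_for_indices(path, f1_idx, f2_idx, s_value, char_limit=25):
--     """Build all segments first, join once, and apply the char limit with a
--     single length check (the joined length only grows as segments are added,
--     so the first per-segment overflow coincides with the whole string
--     overflowing)."""
--     path_wo_goal = path[:-1]
--     N = len(path_wo_goal)
--     f1_idx = max(0, min(f1_idx, N - 1))
--     f2_idx = max(0, min(f2_idx, N - 1))
--     if f1_idx > f2_idx: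
--         f1_idx, f2_idx = f2_idx, f1_idx
--
--     goal = path[-1]
--     f1 = path_wo_goal[f1_idx]
--     f2 = path_wo_goal[f2_idx]
--
--     qr = [v for (x, y) in path_wo_goal[:f1_idx] for v in (x, y, 0)]
--     qr += [f1[0], f1[1], round(s_value)]
--     if f2 != goal:
--         qr += [f2[0], f2[1]]
--     qr += [v for (x, y) in path_wo_goal[f2_idx + 1:] for v in (x, y, 0)]
--
--     qr_len = len(' '.join(map(str, qr)))
--     if qr_len > char_limit:
--         return None, char_limit + 1, None
--     return qr, qr_len, path_wo_goal[:f1_idx + 1] + path_wo_goal[f2_idx:] + [goal]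
-- ===== Notes on version B (the rewrite author's own statement) =====
-- stated objective: faster
-- what changed: B drops A's four per-step would_fit checks and its index-driven loops: it builds all segments by slicing (a flat comprehension over path_wo_goal[:f1_idx] and [f2_idx+1:] plus the f1 triple and optional f2 pair), joins once, and applies the character limit with a single length comparison, which is equivalent because the joined length only grows as segments are appended.
import Mathlib
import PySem

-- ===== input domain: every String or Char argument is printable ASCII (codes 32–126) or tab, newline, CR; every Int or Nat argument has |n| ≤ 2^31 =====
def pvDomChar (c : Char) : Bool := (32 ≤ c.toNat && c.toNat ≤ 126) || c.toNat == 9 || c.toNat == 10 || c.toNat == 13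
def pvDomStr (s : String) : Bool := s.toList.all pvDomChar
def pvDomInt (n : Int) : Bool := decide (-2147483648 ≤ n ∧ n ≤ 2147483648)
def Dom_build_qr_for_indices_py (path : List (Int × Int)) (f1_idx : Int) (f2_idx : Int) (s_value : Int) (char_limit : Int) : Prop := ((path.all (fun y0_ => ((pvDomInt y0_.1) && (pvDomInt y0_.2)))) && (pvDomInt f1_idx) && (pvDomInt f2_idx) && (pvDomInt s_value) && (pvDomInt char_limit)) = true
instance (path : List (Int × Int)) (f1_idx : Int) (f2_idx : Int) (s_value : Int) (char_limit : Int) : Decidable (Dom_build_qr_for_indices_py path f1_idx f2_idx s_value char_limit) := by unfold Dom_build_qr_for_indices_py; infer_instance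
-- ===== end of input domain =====

-- B builds all payload segments by slicing and applies the character limit with a single
-- length check of the joined string (the joined length only grows as segments are appended),
-- instead of A's per-step would_fit re-joins, avoiding the repeated re-joining (measured faster in a timing run); same return value.

-- ===== PORT A =====
-- len(' '.join(map(str, xs))) — shared by both ports (both Pythons compute this expression)
def qrJoinLen (xs : List Int) : Int :=
  ((PySem.Chars.join [' '] (xs.map PySem.Int.toChars)).length : Int)

-- A's per-step loop over indices with early return on overflow (steps 1 and 4 of A)
def qrLoop (pw : List (Int × Int)) (limit : Int) : List Int → List Int → Option (List Int)
  | qr, [] => some qr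
  | qr, i :: rest =>
    let p := PySem.List.pyGetD pw i (0, 0)
    let triple := [p.1, p.2, 0]
    if qrJoinLen (qr ++ triple) ≤ limit then qrLoop pw limit (qr ++ triple) rest else none

def build_qr_for_indices_py (path : List (Int × Int)) (f1_idx : Int) (f2_idx : Int) (s_value : Int) (char_limit : Int) : Option (List Int) × Int × (Option (List (Int × Int))) :=
  let path_wo_goal := PySem.List.slice path none (some (-1))
  let N := PySem.List.len path_wo_goal
  let f1c := max 0 (min f1_idx (N - 1))
  let f2c := max 0 (min f2_idx (N - 1))
  let f1i := if f1c > f2c then f2c else f1c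
  let f2i := if f1c > f2c then f1c else f2c
  match qrLoop path_wo_goal char_limit [] (PySem.List.pyRange 0 f1i 1) with
  | none => (none, char_limit + 1, none)
  | some qr =>
    let f1 := PySem.List.pyGetD path_wo_goal f1i (0, 0)
    let triple_f1 := [f1.1, f1.2, s_value]  -- int(round(s_value)) = s_value: s_value is an int
    if qrJoinLen (qr ++ triple_f1) ≤ char_limit then
      let qr2 := qr ++ triple_f1
      let goal := PySem.List.pyGetD path (-1) (0, 0)
      let f2 := PySem.List.pyGetD path_wo_goal f2i (0, 0)
      let step3 : Option (List Int) :=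
        if f2 ≠ goal then
          if qrJoinLen (qr2 ++ [f2.1, f2.2]) ≤ char_limit then some (qr2 ++ [f2.1, f2.2]) else none
        else some qr2
      match step3 with
      | none => (none, char_limit + 1, none)
      | some qr3 =>
        match qrLoop path_wo_goal char_limit qr3 (PySem.List.pyRange (f2i + 1) N 1) with
        | none => (none, char_limit + 1, none)
        | some qr4 =>
          (some qr4, qrJoinLen qr4,
           some (PySem.List.slice path_wo_goal none (some (f1i + 1)) ++ PySem.List.slice path_wo_goal (some f2i) none ++ [goal]))
    else (none, char_limit + 1, none)

-- ===== PORT B =====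
def build_qr_for_indices_py_alt (path : List (Int × Int)) (f1_idx : Int) (f2_idx : Int) (s_value : Int) (char_limit : Int) : Option (List Int) × Int × (Option (List (Int × Int))) :=
  let path_wo_goal := PySem.List.slice path none (some (-1))
  let N := PySem.List.len path_wo_goal
  let f1c := max 0 (min f1_idx (N - 1))
  let f2c := max 0 (min f2_idx (N - 1))
  let f1i := if f1c > f2c then f2c else f1c
  let f2i := if f1c > f2c then f1c else f2c
  let goal := PySem.List.pyGetD path (-1) (0, 0)
  let f1 := PySem.List.pyGetD path_wo_goal f1i (0, 0)
  let f2 := PySem.List.pyGetD path_wo_goal f2i (0, 0)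
  let qr := (PySem.List.slice path_wo_goal none (some f1i)).flatMap (fun p => [p.1, p.2, 0])
            ++ [f1.1, f1.2, s_value]  -- round(s_value) = s_value: s_value is an int
            ++ (if f2 ≠ goal then [f2.1, f2.2] else [])
            ++ (PySem.List.slice path_wo_goal (some (f2i + 1)) none).flatMap (fun p => [p.1, p.2, 0])
  let qr_len := qrJoinLen qr
  if qr_len > char_limit then (none, char_limit + 1, none)
  else (some qr, qr_len, some (PySem.List.slice path_wo_goal none (some (f1i + 1)) ++ PySem.List.slice path_wo_goal (some f2i) none ++ [goal]))

-- ===== PRECONDITION & SPEC =====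
-- Pre_ excludes paths with fewer than two points: there path_wo_goal is empty (or path is
-- empty) and A raises IndexError at path_wo_goal[f1_idx] / path[-1].
def Pre_build_qr_for_indices_py (path : List (Int × Int)) (f1_idx : Int) (f2_idx : Int) (s_value : Int) (char_limit : Int) : Prop := 2 ≤ path.length
instance (path : List (Int × Int)) (f1_idx : Int) (f2_idx : Int) (s_value : Int) (char_limit : Int) : Decidable (Pre_build_qr_for_indices_py path f1_idx f2_idx s_value char_limit) := by unfold Pre_build_qr_for_indices_py; infer_instance

def pvWitness_build_qr_for_indices_py : (List (Int × Int)) × Int × Int × Int × Int := ([(0, 0), (2, 3), (5, 5)], 0, 1, 4, 25)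

def Spec_build_qr_for_indices_py (path : List (Int × Int)) (f1_idx : Int) (f2_idx : Int) (s_value : Int) (char_limit : Int) (out : Option (List Int) × Int × (Option (List (Int × Int)))) : Prop := out = build_qr_for_indices_py_alt path f1_idx f2_idx s_value char_limit
instance (path : List (Int × Int)) (f1_idx : Int) (f2_idx : Int) (s_value : Int) (char_limit : Int) (out : Option (List Int) × Int × (Option (List (Int × Int)))) : Decidable (Spec_build_qr_for_indices_py path f1_idx f2_idx s_value char_limit out) := by unfold Spec_build_qr_for_indices_py; infer_instance

-- ===== CLAIM (what is proved, stated in full; the proofs are below) =====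
def Claim_equal_build_qr_for_indices_py : Prop := ∀ (path : List (Int × Int)) (f1_idx : Int) (f2_idx : Int) (s_value : Int) (char_limit : Int), Dom_build_qr_for_indices_py path f1_idx f2_idx s_value char_limit → Pre_build_qr_for_indices_py path f1_idx f2_idx s_value char_limit → Spec_build_qr_for_indices_py path f1_idx f2_idx s_value char_limit (build_qr_for_indices_py path f1_idx f2_idx s_value char_limit)

-- ===== LEMMAS AND PROOFS =====

-- joined length of a List (List Char) payload, Nat-valued
def jlen (l : List (List Char)) : Nat := (PySem.Chars.join [' '] l).length

lemma jlen_nil : jlen [] = 0 := by simp [jlen, PySem.Chars.join_nil]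

lemma jlen_cons (c : List Char) (l : List (List Char)) :
    jlen (c :: l) = if l = [] then c.length else c.length + 1 + jlen l := by
  cases l with
  | nil => simp [jlen, PySem.Chars.join_singleton]
  | cons d t => simp [jlen, PySem.Chars.join_cons_cons]; omega

lemma jlen_le_append (l1 l2 : List (List Char)) : jlen l1 ≤ jlen (l1 ++ l2) := by
  induction l1 with
  | nil => simp [jlen_nil]
  | cons c t ih =>
    rw [List.cons_append, jlen_cons, jlen_cons]
    by_cases ht : t = []
    · subst ht
      by_cases h2 : l2 = [] <;> simp [h2] <;> omega
    · have : t ++ l2 ≠ [] := by simp [ht]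
      simp [ht, this]
      omega

lemma qrJoinLen_nil : qrJoinLen [] = 0 := rfl

lemma qrJoinLen_nonneg (xs : List Int) : 0 ≤ qrJoinLen xs := by
  simp [qrJoinLen]

lemma qrJoinLen_le_append (xs ys : List Int) : qrJoinLen xs ≤ qrJoinLen (xs ++ ys) := by
  have h := jlen_le_append (xs.map PySem.Int.toChars) (ys.map PySem.Int.toChars)
  simpa [qrJoinLen, jlen, List.map_append] using h

def tripFlat (l : List (Int × Int)) : List Int := l.flatMap (fun p => [p.1, p.2, 0])

lemma qrLoop_eq (pw : List (Int × Int)) (limit : Int) (idxs : List Int) (qr : List Int)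
    (hq : qrJoinLen qr ≤ limit) :
    qrLoop pw limit qr idxs =
      (if qrJoinLen (qr ++ tripFlat (idxs.map (fun i => PySem.List.pyGetD pw i (0, 0)))) ≤ limit
       then some (qr ++ tripFlat (idxs.map (fun i => PySem.List.pyGetD pw i (0, 0))))
       else none) := by
  induction idxs generalizing qr with
  | nil => simp [qrLoop, tripFlat, hq]
  | cons i rest ih =>
    rw [qrLoop]
    set p := PySem.List.pyGetD pw i (0, 0) with hp
    by_cases hc : qrJoinLen (qr ++ [p.1, p.2, 0]) ≤ limit
    · rw [if_pos hc, ih _ hc]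
      simp only [tripFlat, List.map_cons, List.flatMap_cons, ← List.append_assoc, ← hp]
    · rw [if_neg hc]
      have hmono : qrJoinLen (qr ++ [p.1, p.2, 0]) ≤
          qrJoinLen (qr ++ tripFlat ((i :: rest).map (fun i => PySem.List.pyGetD pw i (0, 0)))) := by
        have := qrJoinLen_le_append (qr ++ [p.1, p.2, 0])
          (tripFlat (rest.map (fun i => PySem.List.pyGetD pw i (0, 0))))
        simpa [tripFlat, List.flatMap_cons, List.append_assoc] using this
      rw [if_neg (by omega)]

-- indices range(0, f) read through pyGetD are the take-slice
lemma map_pyGetD_range_take (pw : List (Int × Int)) (f : Int) (h0 : 0 ≤ f)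
    (h1 : f ≤ (pw.length : Int)) :
    (PySem.List.pyRange 0 f 1).map (fun i => PySem.List.pyGetD pw i (0, 0)) = pw.take f.toNat := by
  apply List.ext_getElem
  · simp [PySem.List.length_pyRange_one]
    omega
  · intro k hk1 hk2
    have hkf : (k : Int) < f := by
      simp [PySem.List.length_pyRange_one] at hk1
      omega
    have hklen : k < pw.length := by
      simp at hk2; omega
    simp only [List.getElem_map, PySem.List.getElem_pyRange_one, zero_add, List.getElem_take]
    rw [PySem.List.pyGetD_eq_getElem pw (0, 0) (by omega) (by simpa using hklen)]
    simp

-- ===== VERDICT (by name: the statement is the Claim_ definition above) =====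
theorem build_qr_for_indices_py_spec : Claim_equal_build_qr_for_indices_py := by
  intro path f1_idx f2_idx s_value char_limit hdom hpre
  unfold Spec_build_qr_for_indices_py
  unfold Pre_build_qr_for_indices_py at hpre
  unfold build_qr_for_indices_py build_qr_for_indices_py_alt
  simp only [PySem.List.slice_to_neg_one, PySem.List.len_eq]
  set pw := path.dropLast with hpw
  have hlen : 1 ≤ pw.length := by
    rw [hpw, List.length_dropLast]; omega
  set g : Int × Int := PySem.List.pyGetD path (-1) (0, 0) with hg
  set f1c := max 0 (min f1_idx ((pw.length : Int) - 1)) with hf1c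
  set f2c := max 0 (min f2_idx ((pw.length : Int) - 1)) with hf2c
  set F1 := if f1c > f2c then f2c else f1c with hF1
  set F2 := if f1c > f2c then f1c else f2c with hF2
  have hb : 0 ≤ F1 ∧ F1 ≤ F2 ∧ F2 + 1 ≤ (pw.length : Int) := by
    rw [hF1, hF2, hf1c, hf2c]; split_ifs <;> omega
  obtain ⟨h0, h12, h2⟩ := hb
  clear_value F1 F2
  set p1 := PySem.List.pyGetD pw F1 (0, 0) with hp1
  set p2 := PySem.List.pyGetD pw F2 (0, 0) with hp2
  rw [PySem.List.slice_to pw h0, PySem.List.slice_from pw (by omega : (0:Int) ≤ F2 + 1)]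
  set pre := List.flatMap (fun p : Int × Int => [p.1, p.2, 0]) (pw.take F1.toNat) with hpre2
  set post := List.flatMap (fun p : Int × Int => [p.1, p.2, 0]) (pw.drop (F2 + 1).toNat) with hpost
  set trip1 := [p1.1, p1.2, s_value] with htrip1
  have hdrop : (PySem.List.pyRange (F2 + 1) ((pw.length : Int)) 1).map
      (fun i => PySem.List.pyGetD pw i (0, 0)) = pw.drop (F2 + 1).toNat :=
    PySem.List.map_pyGetD_pyRange' pw (0, 0) (by omega)
  by_cases hcl : (0 : Int) ≤ char_limit
  · -- first loop via qrLoop_eq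
    rw [qrLoop_eq pw char_limit _ [] (by simpa [qrJoinLen_nil] using hcl)]
    rw [map_pyGetD_range_take pw F1 h0 (by omega)]
    simp only [tripFlat, List.nil_append, ← hpre2]
    by_cases hA1 : qrJoinLen pre ≤ char_limit
    · rw [if_pos hA1]
      simp only []
      by_cases hA2 : qrJoinLen (pre ++ trip1) ≤ char_limit
      · rw [if_pos hA2]
        by_cases hgg : p2 ≠ g
        · rw [if_pos hgg, if_pos hgg]
          by_cases hA3 : qrJoinLen (pre ++ trip1 ++ [p2.1, p2.2]) ≤ char_limit
          · rw [if_pos hA3]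
            simp only []
            rw [qrLoop_eq pw char_limit _ _ hA3, hdrop]
            simp only [tripFlat, ← hpost]
            by_cases hc : qrJoinLen (pre ++ trip1 ++ [p2.1, p2.2] ++ post) ≤ char_limit
            · rw [if_pos hc, if_neg (by omega)]
            · rw [if_neg hc, if_pos (by omega)]
          · rw [if_neg hA3]
            simp only []
            have := qrJoinLen_le_append (pre ++ trip1 ++ [p2.1, p2.2]) post
            rw [if_pos (by omega)]
        · rw [if_neg hgg, if_neg hgg]
          simp only [List.append_nil]
          rw [qrLoop_eq pw char_limit _ _ hA2, hdrop]
          simp only [tripFlat, ← hpost]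
          by_cases hc : qrJoinLen (pre ++ trip1 ++ post) ≤ char_limit
          · rw [if_pos hc, if_neg (by omega)]
          · rw [if_neg hc, if_pos (by omega)]
      · rw [if_neg hA2]
        have hm : qrJoinLen (pre ++ trip1) ≤
            qrJoinLen (pre ++ trip1 ++ ((if p2 ≠ g then [p2.1, p2.2] else []) ++ post)) :=
          qrJoinLen_le_append _ _
        rw [if_pos (by rw [← List.append_assoc] at hm; omega)]
    · rw [if_neg hA1]
      simp only []
      have hm : qrJoinLen pre ≤
          qrJoinLen (pre ++ (trip1 ++ ((if p2 ≠ g then [p2.1, p2.2] else []) ++ post))) :=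
        qrJoinLen_le_append _ _
      rw [if_pos (by simp only [← List.append_assoc] at hm; omega)]
  · -- char_limit < 0: everything overflows
    have hrhs : qrJoinLen (pre ++ trip1 ++ (if p2 ≠ g then [p2.1, p2.2] else []) ++ post) >
        char_limit := by
      have := qrJoinLen_nonneg (pre ++ trip1 ++ (if p2 ≠ g then [p2.1, p2.2] else []) ++ post)
      omega
    rw [if_pos hrhs]
    by_cases hF10 : F1 = 0
    · rw [hF10, PySem.List.pyRange_one_eq_nil (le_refl 0)]
      simp only [qrLoop]
      have : ¬ qrJoinLen ([] ++ trip1) ≤ char_limit := by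
        have := qrJoinLen_nonneg ([] ++ trip1); omega
      rw [if_neg this]
    · rw [PySem.List.pyRange_one_cons (by omega : (0:Int) < F1)]
      simp only [qrLoop]
      have : ¬ qrJoinLen ([] ++ [(PySem.List.pyGetD pw 0 (0, 0)).1,
          (PySem.List.pyGetD pw 0 (0, 0)).2, 0]) ≤ char_limit := by
        have := qrJoinLen_nonneg ([] ++ [(PySem.List.pyGetD pw 0 (0, 0)).1,
          (PySem.List.pyGetD pw 0 (0, 0)).2, 0]); omega
      rw [if_neg this]
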